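-- pv_equiv track=rewrite | github.com/Chandra-kanth-dev/python_programming | Day 2/print_in_words.py | print_in_words
-- ===== SOURCE A (Python) =====
-- def print_in_words(n):
--     d={
--         1:"one",
--         2:"two",
--         3:"three",
--         4:"four",
--         5:"five",
--         6:"six",
--         7:"seven",
--         8:"eight",
--         9:"nine",
--         0:"zero"
--     }
--     res=[]
--     while(n>0):
--         res.append(d[n%10])
--         n=n//10
--     return ' '.join(res[: : -1])
-- ===== SOURCE B (Python) =====
-- def print_in_words(n):
--     words = ["zero", "one", "two", "three", "four",
--              "five", "six", "seven", "eight", "nine"]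
--     if n <= 0:
--         return ''
--     return ' '.join(words[int(c)] for c in str(n))
-- ===== Notes on version B (the rewrite author's own statement) =====
-- stated objective: idiomatic
-- what changed: Replaces the modulo/division digit-extraction while-loop with list reversal by a single join over the decimal string representation str(n), mapping each character through a word list indexed by the digit (no arithmetic loop, no reversal).
import Mathlib
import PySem

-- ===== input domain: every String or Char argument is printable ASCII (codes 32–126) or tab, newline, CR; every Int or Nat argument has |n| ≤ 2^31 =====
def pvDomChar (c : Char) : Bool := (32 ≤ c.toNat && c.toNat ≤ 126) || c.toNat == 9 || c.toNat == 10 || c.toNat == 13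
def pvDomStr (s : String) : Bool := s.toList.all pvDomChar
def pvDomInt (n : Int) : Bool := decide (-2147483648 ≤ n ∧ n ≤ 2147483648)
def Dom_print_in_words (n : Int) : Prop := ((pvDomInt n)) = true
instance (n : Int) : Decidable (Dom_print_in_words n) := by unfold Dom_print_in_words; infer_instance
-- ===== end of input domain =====

-- B replaces A's modulo/division extraction loop and final list reversal by a
-- single join over the characters of str(n), each looked up in a word list
-- (idiomatic rewrite, same cost).

-- ===== PORT A =====
-- the dict d of A
def pvWordsA : PySem.Dict Int String :=
  PySem.Dict.ofList [(1, "one"), (2, "two"), (3, "three"), (4, "four"), (5, "five"),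
                     (6, "six"), (7, "seven"), (8, "eight"), (9, "nine"), (0, "zero")]

-- the while loop: res.append(d[n%10]); n = n//10   (d[n%10] is always present: for
-- n > 0, n % 10 ∈ {0,…,9}, so the KeyError branch of Python is unreachable; getD "")
def pvLoopA (n : Int) (res : List String) : List String :=
  if 0 < n then
    pvLoopA (PySem.Int.floordiv n 10)
      (res ++ [(pvWordsA.get? (PySem.Int.mod n 10)).getD ""])
  else res
termination_by n.toNat
decreasing_by
  rw [PySem.Int.floordiv_eq_ediv_of_pos (by norm_num)]
  omega

-- ' '.join(res[::-1])  (res[::-1] via slice?; step = -1 ≠ 0 so getD [] is unreachable)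
def print_in_words (n : Int) : String :=
  PySem.Str.join " " ((PySem.List.slice? (pvLoopA n []) none none (-1)).getD [])

-- ===== PORT B =====
-- the list words of B
def pvWordList : List String :=
  ["zero", "one", "two", "three", "four", "five", "six", "seven", "eight", "nine"]

-- words[int(c)] for a single character c of str(n) (always in range; getD "")
def pvWordOfChar (c : Char) : String :=
  (PySem.List.pyGet? pvWordList ((PySem.Int.ofStr? (String.ofList [c])).getD 0)).getD ""

-- ' '.join(words[int(c)] for c in str(n))
def print_in_words_alt (n : Int) : String :=
  if n ≤ 0 then ""
  else PySem.Str.join " " ((PySem.Int.toStr n).toList.map pvWordOfChar)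

-- ===== PRECONDITION & SPEC =====
def Spec_print_in_words (n : Int) (out : String) : Prop := out = print_in_words_alt n
instance (n : Int) (out : String) : Decidable (Spec_print_in_words n out) := by unfold Spec_print_in_words; infer_instance

-- ===== CLAIM (what is proved, stated in full; the proofs are below) =====
def Claim_equal_print_in_words : Prop := ∀ (n : Int), Dom_print_in_words n → Spec_print_in_words n (print_in_words n)

-- ===== LEMMAS AND PROOFS =====

theorem pvLoopA_nil_of_nonpos (n : Int) (h : ¬ 0 < n) : pvLoopA n [] = [] := by
  rw [pvLoopA.eq_def, if_neg h]

-- accumulator lemma for A's loop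
theorem pvLoopA_acc (k : Nat) : ∀ (n : Int), n.toNat ≤ k →
    ∀ res, pvLoopA n res = res ++ pvLoopA n [] := by
  induction k with
  | zero =>
    intro n hn res
    rw [pvLoopA_nil_of_nonpos n (by omega)]
    conv_lhs => rw [pvLoopA.eq_def]
    rw [if_neg (by omega : ¬ (0:Int) < n)]
    simp
  | succ k ih =>
    intro n hn res
    by_cases h : 0 < n
    · have hle : (PySem.Int.floordiv n 10).toNat ≤ k := by
        rw [PySem.Int.floordiv_eq_ediv_of_pos (by norm_num)]
        omega
      conv_lhs => rw [pvLoopA.eq_def]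
      conv_rhs => rw [pvLoopA.eq_def]
      rw [if_pos h, if_pos h]
      rw [ih _ hle (res ++ _), ih _ hle ([] ++ _)]
      simp
    · rw [pvLoopA_nil_of_nonpos n h]
      conv_lhs => rw [pvLoopA.eq_def]
      rw [if_neg h]
      simp

-- A's loop unfolded one digit: word of the last digit in front
theorem pvLoopA_cons (n : Int) (h : 0 < n) :
    pvLoopA n [] = (pvWordsA.get? (PySem.Int.mod n 10)).getD ""
      :: pvLoopA (PySem.Int.floordiv n 10) [] := by
  conv_lhs => rw [pvLoopA.eq_def]
  rw [if_pos h, pvLoopA_acc (PySem.Int.floordiv n 10).toNat _ le_rfl]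
  simp

-- B's per-character lookup agrees with A's dict lookup, digit by digit
theorem pvDigit (d : Nat) (h : d < 10) :
    pvWordOfChar d.digitChar = (pvWordsA.get? (d : Int)).getD "" := by
  interval_cases d <;> decide

-- the decimal characters of m, mapped through B's lookup, are A's word list reversed
theorem pvCore (fuel : Nat) : ∀ (m : Nat) (ds : List Char), 0 < m → m < fuel →
    (Nat.toDigitsCore 10 fuel m ds).map pvWordOfChar
      = (pvLoopA (m : Int) []).reverse ++ ds.map pvWordOfChar := by
  induction fuel with
  | zero => intro m ds hm hf; omega
  | succ fuel ih =>
    intro m ds hm hf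
    rw [Nat.toDigitsCore]
    have hdig : pvWordOfChar (m % 10).digitChar
        = (pvWordsA.get? (PySem.Int.mod (m : Int) 10)).getD "" := by
      have : PySem.Int.mod (m : Int) 10 = ((m % 10 : Nat) : Int) := by
        exact_mod_cast PySem.Int.mod_natCast m 10
      rw [this, pvDigit _ (Nat.mod_lt _ (by norm_num))]
    have hfd : PySem.Int.floordiv (m : Int) 10 = ((m / 10 : Nat) : Int) := by
      exact_mod_cast PySem.Int.floordiv_natCast m 10
    have h0 : pvLoopA (((0 : Nat) : Int)) [] = [] :=
      pvLoopA_nil_of_nonpos _ (by simp)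
    by_cases h10 : m / 10 = 0
    · simp only [h10]
      rw [pvLoopA_cons (m : Int) (by exact_mod_cast hm), hfd, h10, h0]
      simp [hdig]
    · simp only [if_neg h10]
      have hlt : m / 10 < fuel := by
        have := Nat.div_lt_self hm (by norm_num : 1 < 10)
        omega
      rw [ih (m / 10) _ (by omega) hlt]
      rw [pvLoopA_cons (m : Int) (by exact_mod_cast hm), hfd]
      simp [hdig]

-- ===== VERDICT (by name: the statement is the Claim_ definition above) =====
theorem print_in_words_spec : Claim_equal_print_in_words := by
  intro n _
  unfold Spec_print_in_words print_in_words print_in_words_alt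
  by_cases h : 0 < n
  · rw [if_neg (by omega : ¬ n ≤ 0)]
    rw [PySem.List.slice?_none_none_neg_one, Option.getD_some]
    have hto : (PySem.Int.toStr n).toList
        = Nat.toDigitsCore 10 (n.toNat + 1) n.toNat [] := by
      rw [PySem.Int.toList_toStr, PySem.Int.toChars, if_neg (by omega : ¬ n < 0),
        Nat.toDigits]
    rw [hto, pvCore (n.toNat + 1) n.toNat [] (by omega) (by omega)]
    have : ((n.toNat : Nat) : Int) = n := by omega
    rw [this]
    simp
  · rw [if_pos (by omega : n ≤ 0), pvLoopA_nil_of_nonpos n h,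
      PySem.List.slice?_none_none_neg_one]
    decide
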